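-- pv_equiv track=rewrite | github.com/shiyuasuka/KnowMat | src/knowmat/pdf/section_normalizer.py | _needs_kw_abs_interleave_repair
-- ===== SOURCE A (Python) =====
-- from typing import List, Tuple
--
-- def _needs_kw_abs_interleave_repair(types: List[str]) -> bool:
--     """True if keyword lines appear after the first abstract fragment (column bleed)."""
--     seq = [t for t in types if t not in ("blank", "kw_label")]
--     if len(seq) < 4:
--         return False
--     if not any(t == "kw" for t in seq) or not any(t == "abs" for t in seq):
--         return False
--     first_abs = next((i for i, t in enumerate(seq) if t == "abs"), None)
--     if first_abs is None:
--         return False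
--     last_kw = max((i for i, t in enumerate(seq) if t == "kw"), default=-1)
--     return last_kw > first_abs
-- ===== SOURCE B (Python) =====
-- from typing import List
--
-- def _needs_kw_abs_interleave_repair(types: List[str]) -> bool:
--     """True if keyword lines appear after the first abstract fragment (column bleed)."""
--     seq = [t for t in types if t not in ("blank", "kw_label")]
--     if len(seq) < 4:
--         return False
--     seen_abs = False
--     for t in seq:
--         if t == "abs":
--             seen_abs = True
--         elif t == "kw" and seen_abs:
--             return True
--     return False
-- ===== Notes on version B (the rewrite author's own statement) =====
-- stated objective: simpler
-- what changed: Replaced the index-based scans (next for the first 'abs' index, max for the last 'kw' index, two any existence checks, then an index comparison) by a single early-exit forward pass keeping one boolean seen_abs.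
import Mathlib
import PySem

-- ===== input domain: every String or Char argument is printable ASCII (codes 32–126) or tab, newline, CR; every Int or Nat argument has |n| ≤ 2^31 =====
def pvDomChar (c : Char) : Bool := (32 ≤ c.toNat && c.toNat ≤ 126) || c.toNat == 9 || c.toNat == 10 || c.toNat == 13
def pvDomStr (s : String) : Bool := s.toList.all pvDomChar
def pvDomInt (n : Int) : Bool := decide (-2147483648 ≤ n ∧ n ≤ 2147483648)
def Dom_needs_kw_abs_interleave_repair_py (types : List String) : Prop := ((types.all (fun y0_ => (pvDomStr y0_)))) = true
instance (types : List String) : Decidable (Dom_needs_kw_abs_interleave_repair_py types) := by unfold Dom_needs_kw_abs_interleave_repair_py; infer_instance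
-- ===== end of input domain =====

-- B replaces A's four separate scans (two `any` checks, `next` for the first "abs" index,
-- `max` for the last "kw" index, then an index comparison) by one early-exit pass with a
-- boolean `seen_abs`; same return value on every input, return value only (no mutation).

-- ===== PORT A =====
-- port of `next((i for i, t in enumerate(seq) if t == "abs"), None)`
def pvFindAbs : List String → Nat → Option Nat
  | [], _ => none
  | t :: r, i => if t == "abs" then some i else pvFindAbs r (i + 1)

-- port of `max((i for i, t in enumerate(seq) if t == "kw"), default=-1)`:
-- max of a generator with a default is the fold of `max` starting from the default
def pvMaxKw : List String → Nat → Int → Int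
  | [], _, acc => acc
  | t :: r, i, acc => pvMaxKw r (i + 1) (if t == "kw" then max acc (i : Int) else acc)

def needs_kw_abs_interleave_repair_py (types : List String) : Bool :=
  let seq := types.filter (fun t => !(t == "blank" || t == "kw_label"))
  if seq.length < 4 then false
  else if !(seq.any (fun t => t == "kw")) || !(seq.any (fun t => t == "abs")) then false
  else match pvFindAbs seq 0 with
    | none => false
    | some p => decide ((p : Int) < pvMaxKw seq 0 (-1))   -- last_kw > first_abs

-- ===== PORT B =====
def pvLoop : List String → Bool → Bool
  | [], _ => false
  | t :: r, seen =>
      if t == "abs" then pvLoop r true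
      else if t == "kw" && seen then true
      else pvLoop r seen

def needs_kw_abs_interleave_repair_py_alt (types : List String) : Bool :=
  let seq := types.filter (fun t => !(t == "blank" || t == "kw_label"))
  if seq.length < 4 then false
  else pvLoop seq false

-- ===== PRECONDITION & SPEC =====
def Spec_needs_kw_abs_interleave_repair_py (types : List String) (out : Bool) : Prop := out = needs_kw_abs_interleave_repair_py_alt types
instance (types : List String) (out : Bool) : Decidable (Spec_needs_kw_abs_interleave_repair_py types out) := by unfold Spec_needs_kw_abs_interleave_repair_py; infer_instance

-- ===== CLAIM (what is proved, stated in full; the proofs are below) =====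
def Claim_equal_needs_kw_abs_interleave_repair_py : Prop := ∀ (types : List String), Dom_needs_kw_abs_interleave_repair_py types → Spec_needs_kw_abs_interleave_repair_py types (needs_kw_abs_interleave_repair_py types)

-- ===== LEMMAS AND PROOFS =====

-- A's comparison, packaged: what A returns once past its guards
def pvAaux (seq : List String) (i : Nat) : Bool :=
  match pvFindAbs seq i with
  | none => false
  | some p => decide ((p : Int) < pvMaxKw seq i (-1))

theorem pvLoop_true (seq : List String) : pvLoop seq true = seq.any (fun t => t == "kw") := by
  induction seq with
  | nil => rfl
  | cons t r ih =>
    by_cases h : t = "abs"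
    · subst h; simp [pvLoop, ih]
    · by_cases hk : t = "kw"
      · subst hk; simp [pvLoop]
      · simp [pvLoop, h, hk, ih]

theorem pvMaxKw_acc (seq : List String) : ∀ (i : Nat) (acc : Int), -1 ≤ acc →
    pvMaxKw seq i acc = max acc (pvMaxKw seq i (-1)) := by
  induction seq with
  | nil => intro i acc h; simp [pvMaxKw]; omega
  | cons t r ih =>
    intro i acc h
    by_cases hk : t = "kw"
    · subst hk
      simp only [pvMaxKw, beq_self_eq_true, if_pos]
      rw [ih (i+1) (max acc (i:Int)) (by omega), ih (i+1) (max (-1) (i:Int)) (by omega)]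
      have : (-1 : Int) ≤ (i : Int) := by omega
      rcases le_total acc (i : Int) with h1 | h1 <;>
      rcases le_total ((i:Int)) (pvMaxKw r (i+1) (-1)) with h2 | h2 <;>
        simp [max_def] <;> omega
    · simp [pvMaxKw, hk, ih (i+1) acc h]

theorem pvMaxKw_ge (seq : List String) : ∀ (i : Nat) (acc : Int), acc ≤ pvMaxKw seq i acc := by
  induction seq with
  | nil => intro i acc; simp [pvMaxKw]
  | cons t r ih =>
    intro i acc
    by_cases hk : t = "kw"
    · subst hk
      simp only [pvMaxKw, beq_self_eq_true, if_pos]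
      exact le_trans (le_max_left _ _) (ih (i+1) _)
    · simp [pvMaxKw, hk, ih (i+1) acc]

theorem pvMaxKw_noKw (seq : List String) : ∀ (i : Nat) (acc : Int),
    seq.any (fun t => t == "kw") = false → pvMaxKw seq i acc = acc := by
  induction seq with
  | nil => intro i acc _; rfl
  | cons t r ih =>
    intro i acc h
    simp only [List.any_cons, Bool.or_eq_false_iff] at h
    simp [pvMaxKw, h.1, ih (i+1) acc h.2]

-- after the first "abs" (at index < i), "a later kw exists" = "any kw among the rest"
theorem pvMaxKw_gt (seq : List String) : ∀ (i : Nat) (acc p : Int), acc ≤ p → p < (i : Int) →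
    (decide (p < pvMaxKw seq i acc)) = seq.any (fun t => t == "kw") := by
  induction seq with
  | nil => intro i acc p h1 h2; simp [pvMaxKw]; omega
  | cons t r ih =>
    intro i acc p h1 h2
    by_cases hk : t = "kw"
    · subst hk
      simp only [pvMaxKw, beq_self_eq_true, if_pos, List.any_cons, Bool.true_or]
      have : p < pvMaxKw r (i+1) (max acc (i:Int)) :=
        lt_of_lt_of_le (lt_of_lt_of_le h2 (le_max_right _ _)) (pvMaxKw_ge r (i+1) _)
      simp [this]
    · simp only [pvMaxKw]
      simp only [List.any_cons, show (t == "kw") = false by simp [hk], Bool.false_or]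
      exact ih (i+1) acc p h1 (by push_cast; omega)

theorem pvFindAbs_ge (seq : List String) : ∀ (i p : Nat), pvFindAbs seq i = some p → i ≤ p := by
  induction seq with
  | nil => intro i p h; simp [pvFindAbs] at h
  | cons t r ih =>
    intro i p h
    by_cases ha : t = "abs"
    · simp [pvFindAbs, ha] at h; omega
    · simp only [pvFindAbs, show (t == "abs") = false by simp [ha], if_neg Bool.false_ne_true] at h
      have := ih (i+1) p h; omega

theorem pvFindAbs_none (seq : List String) : ∀ (i : Nat), pvFindAbs seq i = none →
    seq.any (fun t => t == "abs") = false := by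
  induction seq with
  | nil => intro i _; rfl
  | cons t r ih =>
    intro i h
    by_cases ha : t = "abs"
    · simp [pvFindAbs, ha] at h
    · simp only [pvFindAbs, show (t == "abs") = false by simp [ha], if_neg Bool.false_ne_true] at h
      simp [ha, ih (i+1) h]

theorem pvLoop_noAbs (seq : List String) : seq.any (fun t => t == "abs") = false →
    pvLoop seq false = false := by
  induction seq with
  | nil => intro _; rfl
  | cons t r ih =>
    intro h
    simp only [List.any_cons, Bool.or_eq_false_iff] at h
    simp [pvLoop, h.1, ih h.2]

-- the state machine equals A's index comparison, for every start index
theorem pvLoop_eq_pvAaux (seq : List String) : ∀ (i : Nat), pvLoop seq false = pvAaux seq i := by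
  induction seq with
  | nil => intro i; rfl
  | cons t r ih =>
    intro i
    by_cases ha : t = "abs"
    · subst ha
      simp only [pvLoop, beq_self_eq_true, if_pos, pvLoop_true]
      simp only [pvAaux, pvFindAbs, beq_self_eq_true, if_pos, pvMaxKw,
        show ("abs" == "kw") = false by decide, if_neg Bool.false_ne_true]
      exact (pvMaxKw_gt r (i+1) (-1) (i:Int) (by omega) (by push_cast; omega)).symm
    · have hab : (t == "abs") = false := by simp [ha]
      by_cases hk : t = "kw"
      · subst hk
        simp only [pvLoop, hab, if_neg Bool.false_ne_true, Bool.and_false,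
          pvAaux, pvFindAbs, pvMaxKw, beq_self_eq_true, if_pos]
        cases hf : pvFindAbs r (i+1) with
        | none => simpa [pvAaux, hf] using pvLoop_noAbs r (pvFindAbs_none r (i+1) hf)
        | some p =>
          have hp : i + 1 ≤ p := pvFindAbs_ge r (i+1) p hf
          rw [ih (i+1)]
          simp only [pvAaux, hf]
          have hmax : max (-1 : Int) (i : Int) = (i : Int) := by omega
          rw [hmax, pvMaxKw_acc r (i+1) (i:Int) (by omega)]
          have : ((p:Int) < max (i:Int) (pvMaxKw r (i+1) (-1))) ↔
              ((p:Int) < pvMaxKw r (i+1) (-1)) := by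
            constructor
            · intro h
              rcases le_total ((i:Int)) (pvMaxKw r (i+1) (-1)) with h1 | h1
              · rwa [max_eq_right h1] at h
              · rw [max_eq_left h1] at h; omega
            · intro h; exact lt_of_lt_of_le h (le_max_right _ _)
          simp [this]
      · have hkb : (t == "kw") = false := by simp [hk]
        simp only [pvLoop, hab, hkb, if_neg Bool.false_ne_true, Bool.false_and,
          pvAaux, pvFindAbs, pvMaxKw]
        rw [ih (i+1)]; rfl

-- ===== VERDICT (by name: the statement is the Claim_ definition above) =====
theorem needs_kw_abs_interleave_repair_py_spec : Claim_equal_needs_kw_abs_interleave_repair_py := by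
  intro types _
  unfold Spec_needs_kw_abs_interleave_repair_py
  unfold needs_kw_abs_interleave_repair_py needs_kw_abs_interleave_repair_py_alt
  set seq := types.filter (fun t => !(t == "blank" || t == "kw_label")) with hseq
  by_cases hlen : seq.length < 4
  · simp [hlen]
  · simp only [if_neg hlen]
    by_cases hkw : seq.any (fun t => t == "kw")
    · by_cases habs : seq.any (fun t => t == "abs")
      · simp only [hkw, habs, Bool.not_true, Bool.or_self, if_neg Bool.false_ne_true]
        exact (pvLoop_eq_pvAaux seq 0).symm
      · have hb : pvLoop seq false = false :=
          pvLoop_noAbs seq (eq_false_of_ne_true habs)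
        simp [hkw, habs, hb]
    · have hkf : seq.any (fun t => t == "kw") = false := eq_false_of_ne_true hkw
      have hb : pvLoop seq false = false := by
        rw [pvLoop_eq_pvAaux seq 0]
        unfold pvAaux
        cases hf : pvFindAbs seq 0 with
        | none => rfl
        | some p =>
          rw [pvMaxKw_noKw seq 0 (-1) hkf]
          simp
      simp [hkf, hb]
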